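-- pv_equiv track=rewrite | github.com/zauonlok/renderer | scripts/utils/gltf.py | _has_meshes
-- ===== SOURCE A (Python) =====
-- def _has_meshes(joint, joints):
--     if joint["meshes"]:
--         return True
--
--     for child_index in joint["children"]:
--         child_joint = joints[child_index]
--         if _has_meshes(child_joint, joints):
--             return True
--
--     return False
-- ===== SOURCE B (Python) =====
-- def _has_meshes(joint, joints):
--     stack = [joint]
--     while stack:
--         node = stack.pop()
--         if node["meshes"]:
--             return True
--         for child_index in node["children"]:
--             stack.append(joints[child_index])
--     return False
-- ===== Notes on version B (the rewrite author's own statement) =====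
-- stated objective: alternative
-- what changed: Replaces A's recursive descent through the joint graph with an iterative DFS that maintains an explicit stack of pending nodes (pop a node, succeed on a truthy 'meshes', otherwise push its children), so the call stack disappears.
import Mathlib
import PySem

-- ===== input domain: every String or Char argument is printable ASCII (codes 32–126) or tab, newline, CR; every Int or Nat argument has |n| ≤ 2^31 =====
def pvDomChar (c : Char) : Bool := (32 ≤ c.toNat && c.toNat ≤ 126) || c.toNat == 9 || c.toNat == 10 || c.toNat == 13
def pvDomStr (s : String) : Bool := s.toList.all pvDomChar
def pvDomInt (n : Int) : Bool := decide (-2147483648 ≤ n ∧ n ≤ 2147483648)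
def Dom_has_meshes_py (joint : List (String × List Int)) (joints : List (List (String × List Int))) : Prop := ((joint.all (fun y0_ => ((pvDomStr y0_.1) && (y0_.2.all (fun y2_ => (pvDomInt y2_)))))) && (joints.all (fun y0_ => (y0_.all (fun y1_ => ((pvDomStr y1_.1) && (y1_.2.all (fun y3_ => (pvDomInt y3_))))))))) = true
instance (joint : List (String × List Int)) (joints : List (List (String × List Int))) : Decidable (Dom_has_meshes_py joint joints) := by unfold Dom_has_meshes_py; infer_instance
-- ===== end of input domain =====

-- B replaces A's recursive descent by an iterative DFS over an explicit stack (alternative decomposition, same result).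

-- ===== PORT A =====
-- literal transliteration of A's recursion; the call stack becomes a fuel parameter
-- (joints.length + 1 bounds the recursion depth on every input Pre_ admits)
def hasMeshesA (joints : List (List (String × List Int))) : Nat → List (String × List Int) → Bool
  | 0, _ => false
  | fuel + 1, joint =>
    if (PySem.Dict.mk joint).getD "meshes" ([] : List Int) ≠ [] then true
    else ((PySem.Dict.mk joint).getD "children" ([] : List Int)).any fun c =>
      hasMeshesA joints fuel (PySem.List.pyGetD joints c [])

def has_meshes_py (joint : List (String × List Int)) (joints : List (List (String × List Int))) : Bool :=
  hasMeshesA joints (joints.length + 1) joint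

-- ===== PORT B =====
-- Source B's while-loop over the explicit stack (head of the list = top of the stack);
-- the fuel (maximal branching + 2)^(joints.length + 2) bounds the number of pops on every input Pre_ admits
def bK (joint : List (String × List Int)) (joints : List (List (String × List Int))) : Nat :=
  (((joint :: joints).map (fun n => ((PySem.Dict.mk n).getD "children" ([] : List Int)).length)).foldl max 0) + 2

def hasMeshesBLoop (joints : List (List (String × List Int))) : Nat → List (List (String × List Int)) → Bool
  | _, [] => false
  | 0, _ :: _ => false
  | fuel + 1, node :: rest =>
    if (PySem.Dict.mk node).getD "meshes" ([] : List Int) ≠ [] then true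
    else hasMeshesBLoop joints fuel
      (((PySem.Dict.mk node).getD "children" ([] : List Int)).foldl
        (fun s c => (PySem.List.pyGetD joints c []) :: s) rest)

def has_meshes_py_alt (joint : List (String × List Int)) (joints : List (List (String × List Int))) : Bool :=
  hasMeshesBLoop joints ((bK joint joints) ^ (joints.length + 2)) [joint]

-- ===== PRECONDITION & SPEC =====
-- a node is well-formed: unique keys (a Python dict cannot hold two bindings of one key),
-- the "meshes" key present, and — when "meshes" is empty, so A reads "children" — the
-- "children" key present with every child index a valid (possibly negative, wrapping)
-- index into joints
def nodeOk (len : Nat) (n : List (String × List Int)) : Prop :=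
  (n.map Prod.fst).Nodup ∧
  ((PySem.Dict.mk n).get? "meshes").isSome ∧
  ((PySem.Dict.mk n).getD "meshes" ([] : List Int) = [] →
    ((PySem.Dict.mk n).get? "children").isSome ∧
    ∀ c ∈ (PySem.Dict.mk n).getD "children" ([] : List Int), -(len : Int) ≤ c ∧ c < (len : Int))

-- the normalised (wrapped) index a Python access joints[c] lands on
def idxN (len : Nat) (c : Int) : Nat := (if c < 0 then c + len else c).toNat

-- successor indices of node i in the graph A recurses through: its (wrapped) child
-- indices, but only when its "meshes" list is empty — A stops at a truthy "meshes"
def kidsOf (joints : List (List (String × List Int))) (i : Nat) : Finset Nat :=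
  if (PySem.Dict.mk (joints.getD i [])).getD "meshes" ([] : List Int) = [] then
    (((PySem.Dict.mk (joints.getD i [])).getD "children" ([] : List Int)).map (idxN joints.length)).toFinset
  else ∅

-- one closure step of the successor relation
def stepF (joints : List (List (String × List Int))) (S : Finset Nat) : Finset Nat :=
  S ∪ S.biUnion (kidsOf joints)

-- the meshless part of the joint graph has no directed cycle: no index reaches itself
-- (joints.length closure steps compute full reachability over indices < joints.length)
def Acyclic (joints : List (List (String × List Int))) : Prop :=
  ∀ i < joints.length, i ∉ (stepF joints)^[joints.length] (kidsOf joints i)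

-- Pre_ excludes exactly the shapes on which A does not return normally — a KeyError on a
-- missing "meshes"/"children" key, an IndexError on a child index outside [-len, len), a
-- RecursionError on a cycle among meshless joints — except that, to stay closed-form,
-- well-formedness and acyclicity are required of ALL of joints once the traversal enters
-- joints at all, so inputs whose only defect lies in nodes the traversal never reaches
-- (A still returns there) are also excluded; duplicate keys in a node are excluded too
-- (a Python dict cannot hold them)
def Pre_has_meshes_py (joint : List (String × List Int)) (joints : List (List (String × List Int))) : Prop :=
  nodeOk joints.length joint ∧
  (((PySem.Dict.mk joint).getD "meshes" ([] : List Int) = [] ∧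
      (PySem.Dict.mk joint).getD "children" ([] : List Int) ≠ []) →
    (∀ nd ∈ joints, nodeOk joints.length nd) ∧ Acyclic joints)

instance (joint : List (String × List Int)) (joints : List (List (String × List Int))) : Decidable (Pre_has_meshes_py joint joints) := by
  unfold Pre_has_meshes_py nodeOk Acyclic; infer_instance

def pvWitness_has_meshes_py : (List (String × List Int)) × (List (List (String × List Int))) :=
  ([("meshes", []), ("children", [1])], [[("meshes", [7]), ("children", [])], [("meshes", []), ("children", [0])]])

def Spec_has_meshes_py (joint : List (String × List Int)) (joints : List (List (String × List Int))) (out : Bool) : Prop := out = has_meshes_py_alt joint joints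
instance (joint : List (String × List Int)) (joints : List (List (String × List Int))) (out : Bool) : Decidable (Spec_has_meshes_py joint joints out) := by unfold Spec_has_meshes_py; infer_instance

-- ===== CLAIM (what is proved, stated in full; the proofs are below) =====
def Claim_equal_has_meshes_py : Prop := ∀ (joint : List (String × List Int)) (joints : List (List (String × List Int))), Dom_has_meshes_py joint joints → Pre_has_meshes_py joint joints → Spec_has_meshes_py joint joints (has_meshes_py joint joints)

-- ===== LEMMAS AND PROOFS =====

-- basic closure facts about stepF ------------------------------------------------

lemma stepF_mono (joints : List (List (String × List Int))) {S T : Finset Nat}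
    (h : S ⊆ T) : stepF joints S ⊆ stepF joints T :=
  Finset.union_subset_union h (Finset.biUnion_subset_biUnion_of_subset_left _ h)

lemma subset_stepF (joints : List (List (String × List Int))) (S : Finset Nat) :
    S ⊆ stepF joints S := Finset.subset_union_left

lemma iter_mono (joints : List (List (String × List Int))) {S T : Finset Nat}
    (h : S ⊆ T) : ∀ k, (stepF joints)^[k] S ⊆ (stepF joints)^[k] T := by
  intro k
  induction k generalizing S T with
  | zero => simpa using h
  | succ k ih =>
    rw [Function.iterate_succ_apply, Function.iterate_succ_apply]
    exact ih (stepF_mono joints h)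

lemma subset_iter (joints : List (List (String × List Int))) (S : Finset Nat) :
    ∀ k, S ⊆ (stepF joints)^[k] S := by
  intro k
  induction k with
  | zero => simp
  | succ k ih =>
    rw [Function.iterate_succ_apply']
    exact ih.trans (subset_stepF joints _)

lemma iter_mono_k (joints : List (List (String × List Int))) (S : Finset Nat)
    {k l : Nat} (h : k ≤ l) : (stepF joints)^[k] S ⊆ (stepF joints)^[l] S := by
  have : (stepF joints)^[(l - k) + k] S = (stepF joints)^[l - k] ((stepF joints)^[k] S) :=
    Function.iterate_add_apply _ _ _ _
  rw [show l = (l - k) + k by omega, this]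
  exact subset_iter joints _ _

lemma kids_subset_range {joints : List (List (String × List Int))}
    (hall : ∀ nd ∈ joints, nodeOk joints.length nd) (i : Nat) :
    kidsOf joints i ⊆ Finset.range joints.length := by
  unfold kidsOf
  by_cases hi : i < joints.length
  · rw [List.getD_eq_getElem joints [] hi]
    split
    · intro j hj
      obtain ⟨c, hc, rfl⟩ := List.mem_map.1 (List.mem_toFinset.1 hj)
      obtain ⟨hlo, hhi⟩ := ((hall _ (List.getElem_mem hi)).2.2 (by assumption)).2 c hc
      simp only [Finset.mem_range, idxN]
      split <;> omega
    · simp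
  · rw [List.getD_eq_default joints [] (by omega)]
    simp [PySem.Dict.getD, PySem.Dict.get?]

lemma iter_range {joints : List (List (String × List Int))}
    (hall : ∀ nd ∈ joints, nodeOk joints.length nd) {S : Finset Nat}
    (hS : S ⊆ Finset.range joints.length) (k : Nat) :
    (stepF joints)^[k] S ⊆ Finset.range joints.length := by
  induction k generalizing S with
  | zero => simpa using hS
  | succ k ih =>
    rw [Function.iterate_succ_apply]
    refine ih (Finset.union_subset hS ?_)
    exact Finset.biUnion_subset.2 fun i _ => kids_subset_range hall i

lemma card_chain (joints : List (List (String × List Int))) (S : Finset Nat) :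
    ∀ k, (∀ j < k, stepF joints ((stepF joints)^[j] S) ≠ (stepF joints)^[j] S) →
      S.card + k ≤ ((stepF joints)^[k] S).card := by
  intro k
  induction k with
  | zero => simp
  | succ k ih =>
    intro h
    have h1 := ih fun j hj => h j (by omega)
    have hne := h k (by omega)
    have hlt : ((stepF joints)^[k] S).card < (stepF joints ((stepF joints)^[k] S)).card :=
      Finset.card_lt_card (Finset.ssubset_iff_subset_ne.2 ⟨subset_stepF joints _, (Ne.symm hne)⟩)
    rw [Function.iterate_succ_apply']
    omega

lemma fix_propagate (joints : List (List (String × List Int))) {X : Finset Nat}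
    (h : stepF joints X = X) : ∀ m, (stepF joints)^[m] X = X := by
  intro m
  induction m with
  | zero => simp
  | succ m ih => rw [Function.iterate_succ_apply', ih, h]

lemma iter_len_fix {joints : List (List (String × List Int))}
    (hall : ∀ nd ∈ joints, nodeOk joints.length nd) {S : Finset Nat}
    (hS : S ⊆ Finset.range joints.length) :
    stepF joints ((stepF joints)^[joints.length] S) = (stepF joints)^[joints.length] S := by
  by_cases hfix : ∃ k ≤ joints.length, stepF joints ((stepF joints)^[k] S) = (stepF joints)^[k] S
  · obtain ⟨k, hk, hf⟩ := hfix
    have heq : (stepF joints)^[joints.length] S = (stepF joints)^[k] S := by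
      rw [show joints.length = (joints.length - k) + k by omega,
        Function.iterate_add_apply]
      exact fix_propagate joints hf _
    rw [heq, hf]
  · exfalso
    have hforall : ∀ k ≤ joints.length,
        stepF joints ((stepF joints)^[k] S) ≠ (stepF joints)^[k] S :=
      fun k hk h => hfix ⟨k, hk, h⟩
    have hchain := card_chain joints S (joints.length + 1)
      (fun j hj => hforall j (by omega))
    have hcard : ((stepF joints)^[joints.length + 1] S).card ≤ joints.length := by
      have := Finset.card_le_card (iter_range hall hS (joints.length + 1))
      simpa using this
    omega

lemma reach_trans {joints : List (List (String × List Int))}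
    (hall : ∀ nd ∈ joints, nodeOk joints.length nd) {S : Finset Nat}
    (hS : S ⊆ Finset.range joints.length) {j : Nat}
    (hj : j ∈ (stepF joints)^[joints.length] S) :
    (stepF joints)^[joints.length] {j} ⊆ (stepF joints)^[joints.length] S := by
  have h1 : ({j} : Finset Nat) ⊆ (stepF joints)^[joints.length] S := by
    simpa using hj
  calc (stepF joints)^[joints.length] {j}
      ⊆ (stepF joints)^[joints.length] ((stepF joints)^[joints.length] S) :=
        iter_mono joints h1 _
    _ = (stepF joints)^[joints.length] S := fix_propagate joints (iter_len_fix hall hS) _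

-- the rank of an index: size of its reachable set; it strictly decreases along edges
def rnk (joints : List (List (String × List Int))) (i : Nat) : Nat :=
  ((stepF joints)^[joints.length] {i}).card

lemma rnk_pos (joints : List (List (String × List Int))) (i : Nat) :
    1 ≤ rnk joints i := by
  have : i ∈ (stepF joints)^[joints.length] {i} :=
    subset_iter joints {i} _ (Finset.mem_singleton_self i)
  have := Finset.card_pos.2 ⟨i, this⟩
  unfold rnk
  omega

lemma rnk_le {joints : List (List (String × List Int))}
    (hall : ∀ nd ∈ joints, nodeOk joints.length nd) {i : Nat}
    (hi : i < joints.length) : rnk joints i ≤ joints.length := by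
  have h : (stepF joints)^[joints.length] {i} ⊆ Finset.range joints.length :=
    iter_range hall (by simpa using hi) _
  have := Finset.card_le_card h
  simpa [rnk] using this

lemma rnk_lt {joints : List (List (String × List Int))}
    (hall : ∀ nd ∈ joints, nodeOk joints.length nd) (hacyc : Acyclic joints)
    {i j : Nat} (hi : i < joints.length) (hj : j ∈ kidsOf joints i) :
    rnk joints j < rnk joints i := by
  have hjr : j < joints.length := by
    have := kids_subset_range hall i hj
    simpa using this
  have hiS : ({i} : Finset Nat) ⊆ Finset.range joints.length := by simpa using hi
  have hstep : j ∈ stepF joints {i} := by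
    simp [stepF, hj]
  have hjn : j ∈ (stepF joints)^[joints.length] {i} := by
    have h1 : stepF joints {i} = (stepF joints)^[1] {i} := by simp
    exact iter_mono_k joints {i} (by omega : 1 ≤ joints.length) (h1 ▸ hstep)
  have hsub : (stepF joints)^[joints.length] {j} ⊆ (stepF joints)^[joints.length] {i} :=
    reach_trans hall hiS hjn
  have hnotin : i ∉ (stepF joints)^[joints.length] {j} := by
    intro hmem
    exact hacyc i hi (iter_mono joints (by simpa using hj) joints.length hmem)
  have hin : i ∈ (stepF joints)^[joints.length] {i} :=
    subset_iter joints {i} _ (Finset.mem_singleton_self i)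
  exact Finset.card_lt_card ((Finset.ssubset_iff_of_subset hsub).2 ⟨i, hin, hnotin⟩)

-- relating a (possibly negative, wrapping) Python index to its normalised index ----

lemma child_entry (joints : List (List (String × List Int))) (c : Int)
    (hlo : -(joints.length : Int) ≤ c) (hhi : c < (joints.length : Int)) :
    ∃ h : idxN joints.length c < joints.length,
      PySem.List.pyGetD joints c [] = joints[idxN joints.length c] := by
  by_cases hc : c < 0
  · have hk0 : 0 < (-c).toNat := by omega
    have hkl : (-c).toNat ≤ joints.length := by omega
    have hce : c = -(((-c).toNat : Nat) : Int) := by omega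
    have hidx : idxN joints.length c = joints.length - (-c).toNat := by
      unfold idxN; rw [if_pos hc]; omega
    refine ⟨by omega, ?_⟩
    have h2 : PySem.List.pyGetD joints (-(((-c).toNat : Nat) : Int)) []
        = joints[joints.length - (-c).toNat]'(by omega) :=
      PySem.List.pyGetD_neg_natCast _ _ _ hk0 hkl
    rw [← hce] at h2
    simpa only [hidx] using h2
  · have hidx : idxN joints.length c = c.toNat := by
      unfold idxN; rw [if_neg hc]
    refine ⟨by omega, ?_⟩
    have h2 : PySem.List.pyGetD joints c [] = joints[c.toNat]'(by omega) :=
      PySem.List.pyGetD_eq_getElem joints [] (by omega) hhi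
    simpa only [hidx] using h2

-- a stack entry: the source joint (at level joints.length + 1) or an element joints[i]
-- (at level rnk joints i, which strictly decreases along child links)
def Ent (joint : List (String × List Int)) (joints : List (List (String × List Int)))
    (ℓ : Nat) (n : List (String × List Int)) : Prop :=
  (n = joint ∧ ℓ = joints.length + 1) ∨
  (∃ i : Nat, ∃ h : i < joints.length, n = joints[i] ∧ ℓ = rnk joints i)

lemma ent_facts {joint : List (String × List Int)} {joints : List (List (String × List Int))}
    (htop : nodeOk joints.length joint)
    (hall : ∀ nd ∈ joints, nodeOk joints.length nd)
    (hacyc : Acyclic joints)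
    {ℓ : Nat} {n : List (String × List Int)}
    (hent : Ent joint joints ℓ n) :
    1 ≤ ℓ ∧ n ∈ joint :: joints ∧
    ((PySem.Dict.mk n).getD "meshes" ([] : List Int) = [] →
      ∀ c ∈ (PySem.Dict.mk n).getD "children" ([] : List Int),
        rnk joints (idxN joints.length c) + 1 ≤ ℓ ∧
        Ent joint joints (rnk joints (idxN joints.length c)) (PySem.List.pyGetD joints c [])) := by
  cases hent with
  | inl h =>
    obtain ⟨rfl, rfl⟩ := h
    refine ⟨by omega, List.mem_cons_self .., ?_⟩
    intro hm c hc
    obtain ⟨hlo, hhi⟩ := (htop.2.2 hm).2 c hc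
    obtain ⟨hj, hget⟩ := child_entry joints c hlo hhi
    have := rnk_le hall hj
    exact ⟨by omega, Or.inr ⟨idxN joints.length c, hj, hget, rfl⟩⟩
  | inr h =>
    obtain ⟨i, hi, rfl, rfl⟩ := h
    have hok := hall _ (List.getElem_mem hi)
    refine ⟨rnk_pos joints i, List.mem_cons_of_mem _ (List.getElem_mem hi), ?_⟩
    intro hm c hc
    obtain ⟨hlo, hhi⟩ := (hok.2.2 hm).2 c hc
    obtain ⟨hj, hget⟩ := child_entry joints c hlo hhi
    have hkid : idxN joints.length c ∈ kidsOf joints i := by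
      unfold kidsOf
      rw [List.getD_eq_getElem joints [] hi, if_pos hm]
      exact List.mem_toFinset.2 (List.mem_map_of_mem hc)
    have := rnk_lt hall hacyc hi hkid
    exact ⟨by omega, Or.inr ⟨idxN joints.length c, hj, hget, rfl⟩⟩

lemma A_stab {joint : List (String × List Int)} {joints : List (List (String × List Int))}
    (htop : nodeOk joints.length joint)
    (hall : ∀ nd ∈ joints, nodeOk joints.length nd)
    (hacyc : Acyclic joints) :
    ∀ ℓ n f₁ f₂, Ent joint joints ℓ n → ℓ ≤ f₁ → ℓ ≤ f₂ →
      hasMeshesA joints f₁ n = hasMeshesA joints f₂ n := by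
  intro ℓ
  induction ℓ using Nat.strong_induction_on with
  | _ ℓ ih =>
    intro n f₁ f₂ hent h1 h2
    obtain ⟨hℓ, hmem, hchild⟩ := ent_facts htop hall hacyc hent
    obtain ⟨a, rfl⟩ : ∃ a, f₁ = a + 1 := ⟨f₁ - 1, by omega⟩
    obtain ⟨b, rfl⟩ : ∃ b, f₂ = b + 1 := ⟨f₂ - 1, by omega⟩
    simp only [hasMeshesA]
    by_cases hm : (PySem.Dict.mk n).getD "meshes" ([] : List Int) = []
    · simp only [hm, ne_eq, not_true_eq_false, if_false]
      apply PySem.List.any_congr_mem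
      intro c hc
      obtain ⟨hle, hent'⟩ := hchild hm c hc
      exact ih (rnk joints (idxN joints.length c)) (by omega) _ a b hent' (by omega) (by omega)
    · simp [hm]

lemma foldl_push (joints : List (List (String × List Int))) (cs : List Int) :
    ∀ rest, cs.foldl (fun s c => (PySem.List.pyGetD joints c []) :: s) rest
      = (cs.map (fun c => PySem.List.pyGetD joints c [])).reverse ++ rest := by
  induction cs with
  | nil => intro rest; simp
  | cons c cs ih => intro rest; simp [ih]

lemma branch_le {joint : List (String × List Int)} {joints : List (List (String × List Int))}
    {n : List (String × List Int)} (hmem : n ∈ joint :: joints) :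
    ((PySem.Dict.mk n).getD "children" ([] : List Int)).length + 2 ≤ bK joint joints := by
  unfold bK
  have hmm : ((PySem.Dict.mk n).getD "children" ([] : List Int)).length ∈
      ((joint :: joints).map (fun m => ((PySem.Dict.mk m).getD "children" ([] : List Int)).length)) :=
    List.mem_map_of_mem hmem
  have := (PySem.List.le_foldl_max ((joint :: joints).map
    (fun m => ((PySem.Dict.mk m).getD "children" ([] : List Int)).length)) 0).2 _ hmm
  omega

lemma loopB_eq {joint : List (String × List Int)} {joints : List (List (String × List Int))}
    (htop : nodeOk joints.length joint)
    (hall : ∀ nd ∈ joints, nodeOk joints.length nd)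
    (hacyc : Acyclic joints) :
    ∀ f (L : List (Nat × List (String × List Int))),
      (∀ p ∈ L, Ent joint joints p.1 p.2) →
      (L.map (fun p => (bK joint joints) ^ p.1)).sum < f →
      hasMeshesBLoop joints f (L.map Prod.snd) = L.any (fun p => hasMeshesA joints p.1 p.2) := by
  intro f
  induction f with
  | zero => intro L hent hsum; exact absurd hsum (Nat.not_lt_zero _)
  | succ f ih =>
    intro L hent hsum
    match L with
    | [] => simp [hasMeshesBLoop]
    | (l, n) :: L' =>
      obtain ⟨hℓ, hmem, hchild⟩ := ent_facts htop hall hacyc (hent _ (List.mem_cons_self ..))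
      obtain ⟨l₁, rfl⟩ : ∃ l₁, l = l₁ + 1 := ⟨l - 1, by omega⟩
      simp only [List.map_cons, List.any_cons, hasMeshesBLoop]
      by_cases hm : (PySem.Dict.mk n).getD "meshes" ([] : List Int) = []
      · simp only [hm, ne_eq, not_true_eq_false, if_false, hasMeshesA]
        rw [foldl_push]
        set K := bK joint joints with hK
        set cs := (PySem.Dict.mk n).getD "children" ([] : List Int) with hcs
        have hKcs : cs.length + 2 ≤ K := branch_le hmem
        set L₂ : List (Nat × List (String × List Int)) :=
          (cs.map (fun c => (rnk joints (idxN joints.length c), PySem.List.pyGetD joints c []))).reverse ++ L' with hL₂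
        have hmap : (cs.map (fun c => PySem.List.pyGetD joints c [])).reverse ++ L'.map Prod.snd
            = L₂.map Prod.snd := by
          simp [hL₂, List.map_reverse, List.map_map, Function.comp_def]
        have hent₂ : ∀ p ∈ L₂, Ent joint joints p.1 p.2 := by
          intro p hp
          rcases List.mem_append.1 hp with hp | hp
          · obtain ⟨c, hc, rfl⟩ := List.mem_map.1 (List.mem_reverse.1 hp)
            exact (hchild hm c hc).2
          · exact hent _ (List.mem_cons_of_mem _ hp)
        have hsum₂ : (L₂.map (fun p => K ^ p.1)).sum < f := by
          have hcssum : ((cs.map (fun c => (rnk joints (idxN joints.length c),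
              PySem.List.pyGetD joints c []))).map (fun p => K ^ p.1)).sum
              ≤ cs.length * K ^ l₁ := by
            have hb : ∀ x ∈ (cs.map (fun c => (rnk joints (idxN joints.length c),
                PySem.List.pyGetD joints c []))).map (fun p => K ^ p.1), x ≤ K ^ l₁ := by
              intro x hx
              obtain ⟨p, hp, rfl⟩ := List.mem_map.1 hx
              obtain ⟨c, hc, rfl⟩ := List.mem_map.1 hp
              exact Nat.pow_le_pow_right (by omega) (by have := (hchild hm c hc).1; omega)
            have := List.sum_le_card_nsmul _ _ hb
            simpa [smul_eq_mul] using this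
          have hmul : (cs.length + 2) * K ^ l₁ ≤ K * K ^ l₁ := Nat.mul_le_mul_right _ hKcs
          have hpow1 : 1 ≤ K ^ l₁ := Nat.one_le_pow _ _ (by omega)
          have hQ : K ^ (l₁ + 1) = K * K ^ l₁ := by ring
          simp only [hL₂, List.map_append, List.sum_append, List.map_reverse, List.sum_reverse]
          simp only [List.map_cons, List.sum_cons] at hsum
          rw [hQ] at hsum
          have := Nat.add_mul (cs.length) 2 (K ^ l₁)
          omega
        rw [hmap, ih L₂ hent₂ hsum₂]
        have hone : (cs.any fun c => hasMeshesA joints (rnk joints (idxN joints.length c)) (PySem.List.pyGetD joints c []))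
            = (cs.any fun c => hasMeshesA joints l₁ (PySem.List.pyGetD joints c [])) := by
          apply PySem.List.any_congr_mem
          intro c hc
          obtain ⟨hle, hent'⟩ := hchild hm c hc
          exact A_stab htop hall hacyc _ _ _ _ hent' (le_refl _) (by omega)
        simp only [hL₂, List.any_append, List.any_reverse, List.any_map, Function.comp_def, hone]
      · simp [hasMeshesA, hm]

-- ===== VERDICT (by name: the statement is the Claim_ definition above) =====
theorem has_meshes_py_spec : Claim_equal_has_meshes_py := by
  intro joint joints _ hPre
  unfold Spec_has_meshes_py
  obtain ⟨htop, hcond⟩ := hPre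
  obtain ⟨g, hg⟩ : ∃ g, (bK joint joints) ^ (joints.length + 2) = g + 1 :=
    ⟨(bK joint joints) ^ (joints.length + 2) - 1,
     by have : 0 < (bK joint joints) ^ (joints.length + 2) := Nat.pow_pos (by unfold bK; omega); omega⟩
  by_cases hm : (PySem.Dict.mk joint).getD "meshes" ([] : List Int) = []
  · by_cases hc : (PySem.Dict.mk joint).getD "children" ([] : List Int) = []
    · simp [has_meshes_py, has_meshes_py_alt, hasMeshesA, hg, hasMeshesBLoop, hm, hc]
    · obtain ⟨hall, hacyc⟩ := hcond ⟨hm, hc⟩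
      have h := loopB_eq htop hall hacyc ((bK joint joints) ^ (joints.length + 2)) [(joints.length + 1, joint)]
        (by intro p hp; simp at hp; subst hp; exact Or.inl ⟨rfl, rfl⟩)
        (by
          simp only [List.map_cons, List.map_nil, List.sum_cons, List.sum_nil, Nat.add_zero]
          exact Nat.pow_lt_pow_right (by unfold bK; omega) (by omega))
      simpa [has_meshes_py, has_meshes_py_alt] using h.symm
  · simp [has_meshes_py, has_meshes_py_alt, hasMeshesA, hg, hasMeshesBLoop, hm]
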